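-- pv_equiv track=rewrite | github.com/IES-Rafael-Alberti/2324-u2-sentencias-repetitivas-javierac11 | src/ejercicio20.py | buscarLetra
-- ===== SOURCE A (Python) =====
-- def buscarLetra(frase, letra):
--     cont = 0
--     salida = ""
--     for i in frase:
--         if i != letra:
--             salida += f"{cont}, no esta\n"
--         else:
--             salida += f"{cont}, esta"
--             return salida
--         cont += 1
--     return salida
-- ===== SOURCE B (Python) =====
-- def buscarLetra(frase, letra):
--     p = next((i for i, c in enumerate(frase) if c == letra), None)
--     count = len(frase) if p is None else p
--     salida = ''.join(f"{i}, no esta\n" for i in range(count))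
--     if p is not None:
--         salida += f"{p}, esta"
--     return salida
-- ===== Notes on version B (the rewrite author's own statement) =====
-- stated objective: alternative
-- what changed: B first locates the index of the first matching character in one search pass, then builds the whole output from that index with range/join, instead of A's single loop that accumulates status lines and early-returns.
import Mathlib
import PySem

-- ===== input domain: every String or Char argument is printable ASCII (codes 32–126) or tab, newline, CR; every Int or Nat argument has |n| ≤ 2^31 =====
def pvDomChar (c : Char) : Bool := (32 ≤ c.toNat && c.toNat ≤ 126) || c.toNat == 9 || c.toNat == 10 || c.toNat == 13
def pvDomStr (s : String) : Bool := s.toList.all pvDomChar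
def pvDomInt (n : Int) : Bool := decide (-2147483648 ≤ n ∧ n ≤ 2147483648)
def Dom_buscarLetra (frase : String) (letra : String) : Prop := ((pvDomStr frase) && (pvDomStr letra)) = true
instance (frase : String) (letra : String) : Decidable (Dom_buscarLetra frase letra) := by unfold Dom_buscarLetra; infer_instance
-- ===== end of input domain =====

-- ===== PORT A =====
-- B locates the first matching character once and builds the output with range/join,
-- instead of A's accumulate-and-early-return loop; alternative decomposition, same result.
def buscarLetraGo (letra : String) : List Char → Nat → String → String
  | [], _, salida => salida
  | c :: rest, cont, salida =>
    if String.ofList [c] ≠ letra then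
      buscarLetraGo letra rest (cont + 1) (salida ++ PySem.Int.toStr (cont : Int) ++ ", no esta\n")
    else
      salida ++ PySem.Int.toStr (cont : Int) ++ ", esta"

def buscarLetra (frase : String) (letra : String) : String :=
  buscarLetraGo letra frase.toList 0 ""

-- ===== PORT B =====
def buscarLetra_alt (frase : String) (letra : String) : String :=
  let p := frase.toList.findIdx? (fun c => String.ofList [c] == letra)
  let count := p.getD frase.toList.length
  let salida := String.join ((List.range count).map
    (fun i : Nat => PySem.Int.toStr (i : Int) ++ ", no esta\n"))
  match p with
  | some i => salida ++ PySem.Int.toStr (i : Int) ++ ", esta"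
  | none => salida

-- ===== PRECONDITION & SPEC =====
def Spec_buscarLetra (frase : String) (letra : String) (out : String) : Prop := out = buscarLetra_alt frase letra
instance (frase : String) (letra : String) (out : String) : Decidable (Spec_buscarLetra frase letra out) := by unfold Spec_buscarLetra; infer_instance

-- ===== CLAIM (what is proved, stated in full; the proofs are below) =====
def Claim_equal_buscarLetra : Prop := ∀ (frase : String) (letra : String), Dom_buscarLetra frase letra → Spec_buscarLetra frase letra (buscarLetra frase letra)

-- ===== LEMMAS AND PROOFS =====
theorem pvJoinFoldl : ∀ (ss : List String) (a : String), List.foldl (· ++ ·) a ss = a ++ String.join ss := by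
  intro ss; induction ss with
  | nil => intro a; simp [String.join]
  | cons x xs ih =>
    intro a
    rw [List.foldl_cons, ih,
        show String.join (x::xs) = x ++ String.join xs from by
          simp only [String.join, List.foldl_cons, String.empty_append]; exact ih x,
        String.append_assoc]

theorem pvJoinCons (s : String) (ss : List String) : String.join (s :: ss) = s ++ String.join ss := by
  simp only [String.join, List.foldl_cons, String.empty_append]; exact pvJoinFoldl ss s

-- the per-position output of A's loop, started at counter n
def pvRender (letra : String) : List Char → Nat → String
  | [], _ => ""
  | c :: rest, n =>
    if String.ofList [c] ≠ letra then
      PySem.Int.toStr (n : Int) ++ ", no esta\n" ++ pvRender letra rest (n + 1)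
    else
      PySem.Int.toStr (n : Int) ++ ", esta"

theorem pvGo_render (letra : String) :
    ∀ (l : List Char) (n : Nat) (s : String),
      buscarLetraGo letra l n s = s ++ pvRender letra l n := by
  intro l; induction l with
  | nil => intro n s; simp [buscarLetraGo, pvRender]
  | cons c rest ih =>
    intro n s
    by_cases h : String.ofList [c] = letra
    · simp [buscarLetraGo, pvRender, h, String.append_assoc]
    · simp [buscarLetraGo, pvRender, h, ih, String.append_assoc]

theorem pvClosed_render (letra : String) :
    ∀ (l : List Char) (n : Nat),
      (match l.findIdx? (fun c => String.ofList [c] == letra) with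
       | some i =>
           String.join ((List.range i).map
             (fun j => PySem.Int.toStr ((n + j : Nat) : Int) ++ ", no esta\n")) ++
           PySem.Int.toStr ((n + i : Nat) : Int) ++ ", esta"
       | none =>
           String.join ((List.range l.length).map
             (fun j => PySem.Int.toStr ((n + j : Nat) : Int) ++ ", no esta\n")))
      = pvRender letra l n := by
  intro l; induction l with
  | nil => intro n; simp [pvRender, String.join]
  | cons c rest ih =>
    intro n
    rw [List.findIdx?_cons]
    by_cases h : String.ofList [c] = letra
    · simp [h, pvRender, String.join]
    · have hb : (String.ofList [c] == letra) = false := by simp [h]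
      rw [hb]
      simp only [Bool.false_eq_true, if_false]
      cases hf : rest.findIdx? (fun c => String.ofList [c] == letra) with
      | none =>
        simp only [Option.map_none]
        have hrec := ih (n + 1); rw [hf] at hrec
        simp only [show ∀ j : Nat, n + 1 + j = n + (j + 1) from fun j => by omega] at hrec
        rw [pvRender, if_pos h, ← hrec]
        simp only [List.length_cons, List.range_succ_eq_map, List.map_cons, List.map_map,
          pvJoinCons, Nat.add_zero]
        simp [String.append_assoc]
        refine congrArg String.join (List.map_congr_left fun j _ => ?_)
        simp only [Function.comp_apply]
        congr 2 <;> (push_cast; ring)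
      | some i =>
        simp only [Option.map_some]
        have hrec := ih (n + 1); rw [hf] at hrec
        simp only [show ∀ j : Nat, n + 1 + j = n + (j + 1) from fun j => by omega] at hrec
        rw [pvRender, if_pos h, ← hrec]
        simp only [List.range_succ_eq_map, List.map_cons, List.map_map,
          pvJoinCons, Nat.add_zero]
        simp [String.append_assoc]
        refine congrArg String.join (List.map_congr_left fun j _ => ?_)
        simp only [Function.comp_apply]
        congr 2

-- ===== VERDICT (by name: the statement is the Claim_ definition above) =====
theorem buscarLetra_spec : Claim_equal_buscarLetra := by
  intro frase letra _
  unfold Spec_buscarLetra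
  rw [buscarLetra, pvGo_render, String.empty_append]
  have h := pvClosed_render letra frase.toList 0
  simp only [Nat.zero_add] at h
  rw [← h]
  unfold buscarLetra_alt
  cases hf : frase.toList.findIdx? (fun c => String.ofList [c] == letra) with
  | none => simp only [Option.getD]
  | some i => simp only [Option.getD]
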